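-- pv_equiv track=rewrite | github.com/thangcao183/mxltools | tools/insert_property.py | find_end_marker
-- ===== SOURCE A (Python) =====
-- def find_end_marker(bitstring):
--     # search for 9 ones sliding
--     marker = '1'*9
--     max_search = min(len(bitstring), 4096)
--     for i in range(0, max_search):
--         if i+9>len(bitstring): break
--         if bitstring[i:i+9]==marker:
--             return i
--     return -1
-- ===== SOURCE B (Python) =====
-- def find_end_marker(bitstring):
--     # single pass maintaining the length of the current run of ones
--     count = 0
--     for i in range(min(len(bitstring), 4104)):
--         if bitstring[i:i+1] == '1':
--             count += 1
--             if count == 9: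
--                 return i - 8
--         else:
--             count = 0
--     return -1
-- ===== Notes on version B (the rewrite author's own statement) =====
-- stated objective: alternative
-- what changed: Replaces the sliding 9-character slice comparison at every start index with a single left-to-right pass that maintains an integer count of consecutive one-characters, returning i-8 the first time the count reaches 9.
import Mathlib
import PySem

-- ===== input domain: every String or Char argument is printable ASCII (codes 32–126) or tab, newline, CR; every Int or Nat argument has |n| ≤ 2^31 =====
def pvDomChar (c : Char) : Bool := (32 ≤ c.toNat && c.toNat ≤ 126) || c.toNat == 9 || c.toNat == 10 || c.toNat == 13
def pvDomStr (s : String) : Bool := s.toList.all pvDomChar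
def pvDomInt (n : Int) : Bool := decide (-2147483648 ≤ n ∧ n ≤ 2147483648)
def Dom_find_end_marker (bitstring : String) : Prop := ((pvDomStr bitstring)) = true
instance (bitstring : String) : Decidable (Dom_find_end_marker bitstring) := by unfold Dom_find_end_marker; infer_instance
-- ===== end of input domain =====

-- B replaces A's sliding 9-character slice comparison with a single pass that counts
-- consecutive '1' characters (alternative decomposition; no speed claim).


-- ===== PORT A =====
-- the 'for i in range(0, max_search)' loop with its break and early return
def pvALoop (s marker : List Char) (i max_search : Nat) : Int :=
  if i < max_search then
    if i + 9 > s.length then -1          -- 'break' falls through to 'return -1'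
    else if PySem.List.slice s (some (i:Int)) (some ((i:Int)+9)) = marker then (i : Int)
    else pvALoop s marker (i+1) max_search
  else -1
termination_by max_search - i

def find_end_marker (bitstring : String) : Int :=
  let marker := List.replicate 9 '1'                      -- '1'*9
  let max_search := min bitstring.toList.length 4096
  pvALoop bitstring.toList marker 0 max_search

-- ===== PORT B =====
-- the counting pass of Source B: count = run of consecutive ones ending just before i
def pvBLoop (s : List Char) (i bound count : Nat) : Int :=
  if i < bound then
    if PySem.List.slice s (some (i:Int)) (some ((i:Int)+1)) = ['1'] then
      if count + 1 = 9 then (i : Int) - 8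
      else pvBLoop s (i+1) bound (count+1)
    else pvBLoop s (i+1) bound 0
  else -1
termination_by bound - i

def find_end_marker_alt (bitstring : String) : Int :=
  pvBLoop bitstring.toList 0 (min bitstring.toList.length 4104) 0

-- ===== PRECONDITION & SPEC =====
def Spec_find_end_marker (bitstring : String) (out : Int) : Prop := out = find_end_marker_alt bitstring
instance (bitstring : String) (out : Int) : Decidable (Spec_find_end_marker bitstring out) := by unfold Spec_find_end_marker; infer_instance

-- ===== CLAIM (what is proved, stated in full; the proofs are below) =====
def Claim_equal_find_end_marker : Prop := ∀ (bitstring : String), Dom_find_end_marker bitstring → Spec_find_end_marker bitstring (find_end_marker bitstring)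

-- ===== LEMMAS AND PROOFS =====

-- bitstring[i:i+1] == '1' tests the single character s[i]
theorem pv_slice1 (s : List Char) (i : Nat) :
    (PySem.List.slice s (some (i:Int)) (some ((i:Int)+1)) = ['1']) ↔ s[i]? = some '1' := by
  rw [show ((i:Int)+1) = ((i:Int) + ((1:Nat):Int)) by norm_num,
      PySem.List.slice_natCast_add]
  constructor
  · intro h
    have := congrArg (fun l => l[0]?) h
    simpa [List.getElem?_drop] using this
  · intro h
    have hi : i < s.length := (List.getElem?_eq_some_iff.mp h).1
    have : (s.drop i) = s[i] :: s.drop (i+1) := by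
      rw [List.drop_eq_getElem_cons hi]
    rw [this]
    simp_all

-- bitstring[i:i+9] == '1'*9 says the nine characters at i..i+8 are all '1'
theorem pv_slice9 (s : List Char) (i : Nat) (h9 : i + 9 ≤ s.length) :
    (PySem.List.slice s (some (i:Int)) (some ((i:Int)+9)) = List.replicate 9 '1') ↔
      ∀ k, k < 9 → s[i+k]? = some '1' := by
  rw [show ((i:Int)+9) = ((i:Int) + ((9:Nat):Int)) by norm_num,
      PySem.List.slice_natCast_add]
  have hlen : ((s.drop i).take 9).length = 9 := by
    simp [List.length_take, List.length_drop]; omega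
  constructor
  · intro h k hk
    have := congrArg (fun l => l[k]?) h
    simp only [List.getElem?_take, List.getElem?_drop, hk, if_pos] at this
    interval_cases k <;> simpa using this
  · intro h
    apply List.ext_getElem?
    intro k
    by_cases hk : k < 9
    · have hh := h k hk
      simp [List.getElem?_drop, hk, hh]
      interval_cases k <;> rfl
    · have h1 : ((s.drop i).take 9)[k]? = none := by
        rw [List.getElem?_eq_none_iff]; omega
      have h2 : (List.replicate 9 '1')[k]? = none := by
        rw [List.getElem?_eq_none_iff]; simp; omega
      rw [h1, h2]

-- once the window would overrun the string, A returns -1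
theorem pvALoop_break (s : List Char) (t M : Nat) (h : t + 9 > s.length) :
    pvALoop s (List.replicate 9 '1') t M = -1 := by
  rw [pvALoop, if_pos h]
  split <;> rfl

-- past max_search, A returns -1
theorem pvALoop_stop (s : List Char) (t M : Nat) (h : M ≤ t) :
    pvALoop s (List.replicate 9 '1') t M = -1 := by
  rw [pvALoop, if_neg (by omega)]

-- a non-'1' at position j kills every window that contains j
theorem pvALoop_skip (s : List Char) (M : Nat) (j : Nat) (hM : M ≤ s.length)
    (hj : s[j]? ≠ some '1') :
    ∀ t, t ≤ j → j < t + 9 →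
      pvALoop s (List.replicate 9 '1') t M = pvALoop s (List.replicate 9 '1') (j+1) M := by
  intro t htj hjt
  induction hn : j + 1 - t generalizing t with
  | zero => omega
  | succ m ih =>
    by_cases htM : t < M
    · by_cases hbr : t + 9 > s.length
      · rw [pvALoop_break s t M hbr, pvALoop_break s (j+1) M (by omega)]
      · have hslice : ¬ (PySem.List.slice s (some (t:Int)) (some ((t:Int)+9)) = List.replicate 9 '1') := by
          rw [pv_slice9 s t (by omega)]
          intro h
          exact hj (by have := h (j - t) (by omega); rwa [show t + (j - t) = j by omega] at this)
        rw [pvALoop, if_pos htM, if_neg hbr, if_neg hslice]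
        by_cases htj' : t = j
        · rw [htj']
        · exact ih (t+1) (by omega) (by omega) (by omega)
    · rw [pvALoop_stop s t M (by omega), pvALoop_stop s (j+1) M (by omega)]

-- main invariant: B at position j with run-count c equals A restarted at j - c
theorem pv_main (s : List Char) :
    ∀ m start j c, j = start + c → c < 9 → j ≤ min s.length 4104 →
      m = min s.length 4104 - j →
      (∀ k, start ≤ k → k < j → s[k]? = some '1') →
      pvBLoop s j (min s.length 4104) c
        = pvALoop s (List.replicate 9 '1') start (min s.length 4096) := by
  intro m
  induction m with
  | zero =>
    intro start j c hj hc hjb hm hones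
    have hjB : j = min s.length 4104 := by omega
    rw [pvBLoop, if_neg (by omega)]
    by_cases hn : s.length ≤ 4104
    · exact (pvALoop_break s start _ (by omega)).symm
    · exact (pvALoop_stop s start _ (by omega)).symm
  | succ m ih =>
    intro start j c hj hc hjb hm hones
    have hjB : j < min s.length 4104 := by omega
    have hjn : j < s.length := by omega
    rw [pvBLoop, if_pos hjB]
    by_cases h1 : s[j]? = some '1'
    · rw [if_pos ((pv_slice1 s j).mpr h1)]
      by_cases hc9 : c + 1 = 9
      · rw [if_pos hc9]
        have hstart : start = j - 8 := by omega
        have hones' : ∀ k, k < 9 → s[start + k]? = some '1' := by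
          intro k hk
          by_cases hk8 : k = 8
          · rw [hk8, show start + 8 = j by omega]; exact h1
          · exact hones (start + k) (by omega) (by omega)
        rw [pvALoop, if_pos (by omega), if_neg (by omega),
            if_pos ((pv_slice9 s start (by omega)).mpr hones')]
        omega
      · rw [if_neg hc9]
        exact ih start (j+1) (c+1) (by omega) (by omega) (by omega) (by omega)
          (fun k hk1 hk2 => by
            by_cases hkj : k = j
            · rw [hkj]; exact h1
            · exact hones k hk1 (by omega))
    · rw [if_neg (fun h => h1 ((pv_slice1 s j).mp h))]
      rw [ih (j+1) (j+1) 0 (by omega) (by omega) (by omega) (by omega) (by omega)]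
      exact (pvALoop_skip s (min s.length 4096) j (by omega) h1 start (by omega) (by omega)).symm

-- ===== VERDICT (by name: the statement is the Claim_ definition above) =====
theorem find_end_marker_spec : Claim_equal_find_end_marker := by
  intro bitstring _
  unfold Spec_find_end_marker find_end_marker find_end_marker_alt
  exact (pv_main bitstring.toList (min bitstring.toList.length 4104) 0 0 0
    rfl (by omega) (by omega) (by omega) (by omega)).symm
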